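-- pv_equiv track=rewrite | github.com/AleksandarLukic96/02155_RISC_V_Instruction_Set_Simulator | src/utils.py | convert_endianess
-- ===== SOURCE A (Python) =====
-- def convert_endianess(data):
--     # Reverse the byte order of the data to the opposite endian
--     res = []
--
--     i = 0
--     while i < (len(data)):
--         res.append(
--             ((data[i] & 0x000000FF) << 24)
--             |((data[i] & 0x0000FF00) <<  8)
--             |((data[i] & 0x00FF0000) >>  8)
--             |((data[i] & 0xFF000000) >> 24)
--             )
--         i += 1
--     return res
-- ===== SOURCE B (Python) =====
-- def convert_endianess(data):
--     # Byte-swap each 32-bit word via its bytes representation instead of bit arithmetic.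
--     return [int.from_bytes((x & 0xFFFFFFFF).to_bytes(4, 'little'), 'big') for x in data]
-- ===== Notes on version B (the rewrite author's own statement) =====
-- stated objective: idiomatic
-- what changed: Replaces the index-driven while loop with four mask/shift/or bit operations per word by a comprehension that reinterprets each masked word's 4-byte little-endian representation as big-endian (int.to_bytes/int.from_bytes).
import Mathlib
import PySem

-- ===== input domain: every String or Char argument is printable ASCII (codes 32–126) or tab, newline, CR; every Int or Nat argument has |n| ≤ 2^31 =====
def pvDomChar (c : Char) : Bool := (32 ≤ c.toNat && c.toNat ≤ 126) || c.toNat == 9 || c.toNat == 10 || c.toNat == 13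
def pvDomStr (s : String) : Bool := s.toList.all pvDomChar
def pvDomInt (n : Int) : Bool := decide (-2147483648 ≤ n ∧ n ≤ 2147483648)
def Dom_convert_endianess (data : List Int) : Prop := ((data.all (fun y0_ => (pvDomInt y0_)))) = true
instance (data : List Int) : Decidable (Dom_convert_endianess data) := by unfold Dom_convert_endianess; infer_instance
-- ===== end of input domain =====

-- B swaps each word's bytes via its 4-byte little-endian representation read back big-endian,
-- instead of A's four mask/shift/or bit operations; same single pass, idiomatic rather than faster.

-- ===== PORT A =====
-- one loop body: ((d&0xFF)<<24) | ((d&0xFF00)<<8) | ((d&0xFF0000)>>8) | ((d&0xFF000000)>>24)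
def convAOne (x : Int) : Int :=
  PySem.Int.bor
    (PySem.Int.bor
      (PySem.Int.bor ((PySem.Int.band x 255) <<< (24 : Nat))
                     ((PySem.Int.band x 65280) <<< (8 : Nat)))
      ((PySem.Int.band x 16711680) >>> (8 : Nat)))
    ((PySem.Int.band x 4278190080) >>> (24 : Nat))

-- the while-loop over i < len(data), appending one converted word per step
def convAGo : List Int → List Int
  | [] => []
  | x :: rest => convAOne x :: convAGo rest

def convert_endianess (data : List Int) : List Int := convAGo data

-- ===== PORT B =====
-- (x & 0xFFFFFFFF).to_bytes(4, 'little')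
def convBBytesLE (n : Nat) : List Nat :=
  [n % 256, n / 256 % 256, n / 65536 % 256, n / 16777216 % 256]

-- int.from_bytes(bs, 'big')
def convBFromBE (bs : List Nat) : Nat := bs.foldl (fun acc b => acc * 256 + b) 0

def convBOne (x : Int) : Int :=
  ((convBFromBE (convBBytesLE (PySem.Int.band x 4294967295).toNat) : Nat) : Int)

def convert_endianess_alt (data : List Int) : List Int := data.map convBOne

-- ===== PRECONDITION & SPEC =====
def Spec_convert_endianess (data : List Int) (out : List Int) : Prop := out = convert_endianess_alt data
instance (data : List Int) (out : List Int) : Decidable (Spec_convert_endianess data out) := by unfold Spec_convert_endianess; infer_instance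

-- ===== CLAIM (what is proved, stated in full; the proofs are below) =====
def Claim_equal_convert_endianess : Prop := ∀ (data : List Int), Dom_convert_endianess data → Spec_convert_endianess data (convert_endianess data)

-- ===== LEMMAS AND PROOFS =====

-- n &&& (2^8-1) masks out all but the lowest byte
theorem pvAnd255 (n : Nat) : n &&& 255 = n % 256 := by
  apply Nat.eq_of_testBit_eq; intro i
  rw [Nat.testBit_and, show (255:ℕ) = 2^8-1 from rfl, Nat.testBit_two_pow_sub_one,
      show (256:ℕ) = 2^8 from rfl, Nat.testBit_mod_two_pow]
  exact Bool.and_comm _ _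

theorem pvAnd65280 (n : Nat) : n &&& 65280 = n / 256 % 256 * 256 := by
  apply Nat.eq_of_testBit_eq; intro i
  rw [show (65280:ℕ) = (2^8-1) <<< 8 from rfl, show (256:ℕ) = 2^8 from rfl]
  rw [Nat.testBit_and, Nat.testBit_shiftLeft, Nat.testBit_mul_two_pow, Nat.testBit_mod_two_pow,
      Nat.testBit_div_two_pow, Nat.testBit_two_pow_sub_one]
  by_cases h : 8 ≤ i
  · have hi : i - 8 + 8 = i := by omega
    rw [hi]; by_cases h2 : i - 8 < 8 <;> simp [h, h2]
  · simp [h]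

theorem pvAnd16711680 (n : Nat) : n &&& 16711680 = n / 65536 % 256 * 65536 := by
  apply Nat.eq_of_testBit_eq; intro i
  rw [show (16711680:ℕ) = (2^8-1) <<< 16 from rfl, show (65536:ℕ) = 2^16 from rfl,
      show (256:ℕ) = 2^8 from rfl]
  rw [Nat.testBit_and, Nat.testBit_shiftLeft, Nat.testBit_mul_two_pow, Nat.testBit_mod_two_pow,
      Nat.testBit_div_two_pow, Nat.testBit_two_pow_sub_one]
  by_cases h : 16 ≤ i
  · have hi : i - 16 + 16 = i := by omega
    rw [hi]; by_cases h2 : i - 16 < 8 <;> simp [h, h2]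
  · simp [h]

theorem pvAnd4278190080 (n : Nat) : n &&& 4278190080 = n / 16777216 % 256 * 16777216 := by
  apply Nat.eq_of_testBit_eq; intro i
  rw [show (4278190080:ℕ) = (2^8-1) <<< 24 from rfl, show (16777216:ℕ) = 2^24 from rfl,
      show (256:ℕ) = 2^8 from rfl]
  rw [Nat.testBit_and, Nat.testBit_shiftLeft, Nat.testBit_mul_two_pow, Nat.testBit_mod_two_pow,
      Nat.testBit_div_two_pow, Nat.testBit_two_pow_sub_one]
  by_cases h : 24 ≤ i
  · have hi : i - 24 + 24 = i := by omega
    rw [hi]; by_cases h2 : i - 24 < 8 <;> simp [h, h2]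
  · simp [h]

theorem pvAndFFFFFFFF (n : Nat) : n &&& 4294967295 = n % 4294967296 := by
  apply Nat.eq_of_testBit_eq; intro i
  rw [Nat.testBit_and, show (4294967295:ℕ) = 2^32-1 from rfl, Nat.testBit_two_pow_sub_one,
      show (4294967296:ℕ) = 2^32 from rfl, Nat.testBit_mod_two_pow]
  exact Bool.and_comm _ _

-- assembling four bytes: the or of the four disjoint shifted bytes is their weighted sum
theorem pvOr4 (c0 c1 c2 c3 : Nat) (_h0 : c0 < 256) (h1 : c1 < 256) (h2 : c2 < 256) (h3 : c3 < 256) :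
    ((c0 <<< 24 ||| (c1 * 256) <<< 8) ||| (c2 * 65536) >>> 8) ||| (c3 * 16777216) >>> 24
      = ((c0 * 256 + c1) * 256 + c2) * 256 + c3 := by
  have e2 : (c2 * 65536) >>> 8 = c2 * 256 := by
    rw [Nat.shiftRight_eq_div_pow]; omega
  have e3 : (c3 * 16777216) >>> 24 = c3 := by
    rw [Nat.shiftRight_eq_div_pow]; omega
  have s1 : c0 <<< 24 ||| (c1 * 256) <<< 8 = (c0 * 256 + c1) * 65536 := by
    have : c0 <<< 24 = (c0 <<< 8) <<< 16 := by simp [Nat.shiftLeft_eq, pow_succ]; ring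
    rw [this, show (c1 * 256) <<< 8 = c1 <<< 16 from by simp [Nat.shiftLeft_eq]; ring,
        ← Nat.shiftLeft_or_distrib,
        ← Nat.shiftLeft_add_eq_or_of_lt (by omega : c1 < 2 ^ 8)]
    simp [Nat.shiftLeft_eq]
  rw [s1, e2, e3]
  have s2 : (c0 * 256 + c1) * 65536 ||| c2 * 256 = ((c0 * 256 + c1) * 256 + c2) * 256 := by
    rw [show (c0 * 256 + c1) * 65536 = ((c0 * 256 + c1) <<< 8) <<< 8 from by
          simp [Nat.shiftLeft_eq]; ring,
        show c2 * 256 = c2 <<< 8 from by simp [Nat.shiftLeft_eq],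
        ← Nat.shiftLeft_or_distrib,
        ← Nat.shiftLeft_add_eq_or_of_lt (by omega : c2 < 2 ^ 8)]
    simp [Nat.shiftLeft_eq]
  rw [s2, show ((c0 * 256 + c1) * 256 + c2) * 256 = ((c0 * 256 + c1) * 256 + c2) <<< 8 from by
        simp [Nat.shiftLeft_eq],
      ← Nat.shiftLeft_add_eq_or_of_lt (by omega : c3 < 2 ^ 8)]

-- casts of shifts
theorem pvCastShl (m k : Nat) : ((m : Int) <<< k) = ((m <<< k : Nat) : Int) := by
  simp [Int.shiftLeft_eq, Nat.shiftLeft_eq]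
theorem pvCastShr (m k : Nat) : ((m : Int) >>> k) = ((m >>> k : Nat) : Int) := by
  simp [Int.shiftRight_eq_div_pow, Nat.shiftRight_eq_div_pow]

-- pushing the 2^32 mask through byte extraction
theorem pvMD1 (p : Nat) : p % 4294967296 % 256 = p % 256 :=
  Nat.mod_mod_of_dvd _ (by norm_num : (256:ℕ) ∣ 4294967296)
theorem pvMD2 (p : Nat) : p % 4294967296 / 256 % 256 = p / 256 % 256 := by
  rw [show (4294967296:ℕ) = 256 * 16777216 from rfl, Nat.mod_mul_right_div_self,
      Nat.mod_mod_of_dvd _ (by norm_num : (256:ℕ) ∣ 16777216)]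
theorem pvMD3 (p : Nat) : p % 4294967296 / 65536 % 256 = p / 65536 % 256 := by
  rw [show (4294967296:ℕ) = 65536 * 65536 from rfl, Nat.mod_mul_right_div_self,
      Nat.mod_mod_of_dvd _ (by norm_num : (256:ℕ) ∣ 65536)]
theorem pvMD4 (p : Nat) : p % 4294967296 / 16777216 % 256 = p / 16777216 % 256 := by
  rw [show (4294967296:ℕ) = 16777216 * 256 from rfl, Nat.mod_mul_right_div_self]
  omega

-- PySem.Int.band with a negative left argument and nonnegative mask, unfolded
theorem pvBandNeg (x : Int) (hx : x < 0) (m : Int) (hm : 0 ≤ m) :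
    PySem.Int.band x m = ((m.toNat - (m.toNat &&& (-x - 1).toNat) : Nat) : Int) := by
  simp [PySem.Int.band, not_le.mpr hx, hm]

-- the pointwise identity
theorem pvOne (x : Int) : convAOne x = convBOne x := by
  by_cases hx : 0 ≤ x
  · unfold convAOne convBOne convBBytesLE convBFromBE
    rw [PySem.Int.band_of_nonneg hx (by norm_num), PySem.Int.band_of_nonneg hx (by norm_num),
        PySem.Int.band_of_nonneg hx (by norm_num), PySem.Int.band_of_nonneg hx (by norm_num),
        PySem.Int.band_of_nonneg hx (by norm_num)]
    set p := x.toNat with hp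
    simp only [show Int.toNat 255 = 255 from rfl, show Int.toNat 65280 = 65280 from rfl,
      show Int.toNat 16711680 = 16711680 from rfl, show Int.toNat 4278190080 = 4278190080 from rfl,
      show Int.toNat 4294967295 = 4294967295 from rfl]
    rw [pvCastShl, pvCastShl, pvCastShr, pvCastShr]
    rw [PySem.Int.bor_natCast, PySem.Int.bor_natCast, PySem.Int.bor_natCast]
    rw [pvAnd255, pvAnd65280, pvAnd16711680, pvAnd4278190080, pvAndFFFFFFFF]
    norm_cast
    rw [pvOr4 (p % 256) (p / 256 % 256) (p / 65536 % 256) (p / 16777216 % 256)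
          (by omega) (by omega) (by omega) (by omega)]
    simp only [List.foldl]
    rw [pvMD1, pvMD2, pvMD3, pvMD4]
    omega
  · have hx : x < 0 := by omega
    unfold convAOne convBOne convBBytesLE convBFromBE
    rw [pvBandNeg x hx 255 (by norm_num), pvBandNeg x hx 65280 (by norm_num),
        pvBandNeg x hx 16711680 (by norm_num), pvBandNeg x hx 4278190080 (by norm_num),
        pvBandNeg x hx 4294967295 (by norm_num)]
    set y := (-x - 1).toNat with hy
    simp only [show Int.toNat 255 = 255 from rfl, show Int.toNat 65280 = 65280 from rfl,
      show Int.toNat 16711680 = 16711680 from rfl, show Int.toNat 4278190080 = 4278190080 from rfl,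
      show Int.toNat 4294967295 = 4294967295 from rfl]
    rw [Nat.land_comm 255 y, Nat.land_comm 65280 y, Nat.land_comm 16711680 y,
        Nat.land_comm 4278190080 y, Nat.land_comm 4294967295 y]
    rw [pvAnd255, pvAnd65280, pvAnd16711680, pvAnd4278190080, pvAndFFFFFFFF]
    rw [pvCastShl, pvCastShl, pvCastShr, pvCastShr]
    rw [PySem.Int.bor_natCast, PySem.Int.bor_natCast, PySem.Int.bor_natCast]
    norm_cast
    rw [show (65280 - y / 256 % 256 * 256 : Nat) = (255 - y / 256 % 256) * 256 from by omega,
        show (16711680 - y / 65536 % 256 * 65536 : Nat) = (255 - y / 65536 % 256) * 65536 from by omega,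
        show (4278190080 - y / 16777216 % 256 * 16777216 : Nat) = (255 - y / 16777216 % 256) * 16777216 from by omega]
    rw [pvOr4 (255 - y % 256) (255 - y / 256 % 256) (255 - y / 65536 % 256) (255 - y / 16777216 % 256)
          (by omega) (by omega) (by omega) (by omega)]
    simp only [List.foldl]
    have ht : y % 4294967296 < 4294967296 := Nat.mod_lt _ (by norm_num)
    have n0 : (4294967295 - y % 4294967296) % 256 = 255 - y % 4294967296 % 256 := by omega
    have n1 : (4294967295 - y % 4294967296) / 256 % 256 = 255 - y % 4294967296 / 256 % 256 := by
      omega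
    have n2 : (4294967295 - y % 4294967296) / 65536 % 256 = 255 - y % 4294967296 / 65536 % 256 := by
      omega
    have n3 : (4294967295 - y % 4294967296) / 16777216 % 256
        = 255 - y % 4294967296 / 16777216 % 256 := by omega
    rw [n0, n1, n2, n3, pvMD1, pvMD2, pvMD3, pvMD4]
    omega

theorem pvGoMap (l : List Int) : convAGo l = l.map convBOne := by
  induction l with
  | nil => rfl
  | cons x rest ih => simp [convAGo, ih, pvOne]

-- ===== VERDICT (by name: the statement is the Claim_ definition above) =====
theorem convert_endianess_spec : Claim_equal_convert_endianess := by
  intro data _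
  unfold Spec_convert_endianess convert_endianess convert_endianess_alt
  exact pvGoMap data
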